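-- pv_equiv track=rewrite | github.com/edoardottt/programming-fundamentals | Workbook/Recursion/Recursion_8/program.py | es76
-- ===== SOURCE A (Python) =====
-- def es76(parola):
--     '''
--     Si definisca la funzione ricorsiva (o che usa una vostra funzione ricorsiva)
--     es76(parola), che presa in input una stringa di caratteri  parola restituisce la lista dei
--     suffissi di parola. Gli elementi della lista devono risultare ordinati per lunghezza decrescente .
--     Si ricorda che un suffisso di una parola e' quello che si ottiene concellando 0 o piu'
--     caratteri iniziali della parola.
--     Ad esempio per es76("fondamenti") la lista restituita sara'
--     ['fondamenti', 'ondamenti', 'ndamenti', 'damenti', 'amenti', 'menti', 'enti', 'nti', 'ti', 'i']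
--     '''
--     lista = recursion(parola,[])
--     diz = {}
--     result=[]
--     for elem in lista:
--         if len(elem) not in lista: diz[len(elem)] = [elem]
--         else: diz[len(elem)].append(elem)
--     for k in sorted(diz.keys(),reverse=True):
--         result.extend(diz[k])
--     return result
--
-- def recursion(parola,l):
--     if len(parola)==0: return l
--     else:
--         l.append(parola)
--         recursion(parola[1:],l)
--     return l
-- ===== SOURCE B (Python) =====
-- def es76(parola):
--     # Direct construction: slicing at each start index yields the suffixes
--     # already in decreasing-length order; no recursion, dict or sort needed.
--     return [parola[i:] for i in range(len(parola))]
-- ===== Notes on version B (the rewrite author's own statement) =====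
-- stated objective: simpler
-- what changed: B replaces A's recursion-then-bucket-by-length-dict-then-descending-sort pipeline with a single comprehension that slices at each start index, emitting the suffixes directly in decreasing-length order.
import Mathlib
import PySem

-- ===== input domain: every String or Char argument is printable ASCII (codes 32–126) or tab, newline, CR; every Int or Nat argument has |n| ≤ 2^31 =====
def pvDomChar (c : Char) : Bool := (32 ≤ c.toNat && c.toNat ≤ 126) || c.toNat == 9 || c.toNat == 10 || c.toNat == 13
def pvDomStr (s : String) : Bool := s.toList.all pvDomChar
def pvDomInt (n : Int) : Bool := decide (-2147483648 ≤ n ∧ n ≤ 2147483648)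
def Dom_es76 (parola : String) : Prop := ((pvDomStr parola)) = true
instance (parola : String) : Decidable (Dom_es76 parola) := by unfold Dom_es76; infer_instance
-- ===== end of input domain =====

-- B builds the suffix list directly by slicing at each start index (already in
-- decreasing-length order), replacing A's recursion + dict bucketing + descending sort.

-- ===== PORT A =====
-- Python's 'int == str' is always False, so 'len(elem) not in lista'
-- (an int tested against a list of strings) is always True.
def pyEqIntStr (_ : Int) (_ : String) : Bool := false

-- recursion(parola, l): l.append(parola); recursion(parola[1:], l); return l
def es76_recursion (parola : String) (l : List String) : List String :=
  if parola.toList.length = 0 then l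
  else es76_recursion (PySem.Str.slice parola (some 1) none) (l ++ [parola])
termination_by parola.toList.length
decreasing_by
  simp [PySem.Str.slice, PySem.List.slice_from_one]
  rw [← String.length_toList]
  omega

def es76 (parola : String) : List String :=
  let lista := es76_recursion parola []
  let diz := lista.foldl (fun diz elem =>
    if !(lista.any (fun s => pyEqIntStr (PySem.Str.len elem) s)) then
      diz.insert (PySem.Str.len elem) [elem]
    else
      -- 'diz[len(elem)].append(elem)' — unreachable: the test above is always True
      diz.modify (PySem.Str.len elem) [] (· ++ [elem])) PySem.Dict.empty
  -- 'diz[k]' with k drawn from diz's keys: always present, getD's default never used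
  (PySem.List.sorted diz.keys (fun k => k) true).foldl
    (fun result k => result ++ diz.getD k []) []

-- ===== PORT B =====
-- Source B: return [parola[i:] for i in range(len(parola))]
def es76_alt (parola : String) : List String :=
  (PySem.List.pyRange 0 (PySem.Str.len parola) 1).map
    (fun i => PySem.Str.slice parola (some i) none)

-- ===== PRECONDITION & SPEC =====
def Spec_es76 (parola : String) (out : List String) : Prop := out = es76_alt parola
instance (parola : String) (out : List String) : Decidable (Spec_es76 parola out) := by unfold Spec_es76; infer_instance

-- ===== CLAIM (what is proved, stated in full; the proofs are below) =====
def Claim_equal_es76 : Prop := ∀ (parola : String), Dom_es76 parola → Spec_es76 parola (es76 parola)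

-- ===== LEMMAS AND PROOFS =====

-- the nonempty suffixes of cs, longest first
def pvTails : List Char → List String
  | [] => []
  | c :: cs => String.ofList (c :: cs) :: pvTails cs

theorem pv_rec_eq (cs : List Char) : ∀ acc : List String,
    es76_recursion (String.ofList cs) acc = acc ++ pvTails cs := by
  induction cs with
  | nil => intro acc; unfold es76_recursion; simp [pvTails]
  | cons c cs ih =>
    intro acc
    unfold es76_recursion
    simp [PySem.Str.slice, PySem.List.slice_from_one, ih, pvTails]

theorem pv_len_mem_tails (cs : List Char) :
    ∀ e ∈ pvTails cs, PySem.Str.len e ≤ (cs.length : Int) := by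
  induction cs with
  | nil => simp [pvTails]
  | cons c cs ih =>
    intro e he
    simp only [pvTails, List.mem_cons] at he
    rcases he with rfl | he
    · simp [PySem.Str.len_eq]
    · have := ih e he
      simp only [PySem.Str.len_eq] at this ⊢
      simp only [List.length_cons]
      push_cast at this ⊢
      omega

theorem pv_tails_pairwise (cs : List Char) :
    (pvTails cs).Pairwise (fun a b => PySem.Str.len b < PySem.Str.len a) := by
  induction cs with
  | nil => simp [pvTails]
  | cons c cs ih =>
    simp only [pvTails, List.pairwise_cons]
    refine ⟨fun b hb => ?_, ih⟩
    have := pv_len_mem_tails cs b hb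
    simp only [PySem.Str.len_eq, String.toList_ofList, List.length_cons] at this ⊢
    push_cast at this ⊢
    omega

theorem pv_map_len_pairwise (cs : List Char) :
    ((pvTails cs).map PySem.Str.len).Pairwise (fun a b => b < a) := by
  rw [List.pairwise_map]
  exact pv_tails_pairwise cs

theorem pv_map_len_nodup (cs : List Char) :
    ((pvTails cs).map PySem.Str.len).Nodup := by
  have h := pv_map_len_pairwise cs
  exact h.imp (fun {a b} hab => by omega)

-- the descending-extend fold over a list of keys mapped from L, when each key looks up [e]
theorem pv_foldl_extend (diz : PySem.Dict Int (List String)) :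
    ∀ (L : List String) (init : List String),
      (∀ e ∈ L, diz.getD (PySem.Str.len e) [] = [e]) →
      (L.map PySem.Str.len).foldl (fun r k => r ++ diz.getD k []) init = init ++ L := by
  intro L
  induction L with
  | nil => simp
  | cons e L ih =>
    intro init h
    simp only [List.map_cons, List.foldl_cons]
    rw [h e (List.mem_cons_self), ih _ (fun x hx => h x (List.mem_cons_of_mem _ hx))]
    simp

theorem pv_es76_eq_tails (parola : String) : es76 parola = pvTails parola.toList := by
  unfold es76
  have hrec : es76_recursion parola [] = pvTails parola.toList := by
    have := pv_rec_eq parola.toList []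
    simpa using this
  rw [hrec]
  -- the condition in the first loop is always true
  have hcond : ∀ (lista : List String) (elem : String),
      (!(lista.any (fun s => pyEqIntStr (PySem.Str.len elem) s))) = true := by
    intro lista elem; simp [pyEqIntStr]
  simp only [hcond, if_pos]
  -- the dict is built by inserting fresh distinct keys
  set lista := pvTails parola.toList with hl
  have hfresh : ∀ a ∈ lista, (PySem.Dict.empty : PySem.Dict Int (List String)).contains
      (PySem.Str.len a) = false := fun a _ => PySem.Dict.contains_empty _
  have hnodup := pv_map_len_nodup parola.toList
  have hitems := PySem.Dict.items_foldl_insert_fresh lista PySem.Str.len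
      (fun e => [e]) PySem.Dict.empty hfresh (by rw [← hl] at hnodup; exact hnodup)
  set diz := lista.foldl
      (fun d e => d.insert (PySem.Str.len e) [e]) (PySem.Dict.empty : PySem.Dict Int (List String))
      with hd
  have hempty : (PySem.Dict.empty : PySem.Dict Int (List String)).items = [] := rfl
  rw [hempty, List.nil_append] at hitems
  have hkeys : diz.keys = lista.map PySem.Str.len := by
    simp only [PySem.Dict.keys, hitems, List.map_map]
    rfl
  have hkeysnodup : diz.keys.Nodup := by rw [hkeys, hl]; exact hnodup
  -- sorted(keys, reverse=True) is keys itself (strictly decreasing already)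
  have hsorted : PySem.List.sorted diz.keys (fun k => k) true = diz.keys := by
    apply PySem.List.sorted_rev_eq_of_perm_of_pairwise_gt diz.keys diz.keys (fun k => k)
      (List.Perm.refl _)
    rw [hkeys, hl]
    exact pv_map_len_pairwise parola.toList
  rw [hsorted, hkeys]
  -- each lookup returns the singleton bucket
  have hget : ∀ e ∈ lista, diz.getD (PySem.Str.len e) [] = [e] := by
    intro e he
    exact PySem.Dict.getD_of_mem_items diz
      (by rw [hitems]; exact List.mem_map_of_mem he) hkeysnodup []
  rw [pv_foldl_extend diz lista [] hget]
  rfl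

theorem pv_alt_eq_tails_list (cs : List Char) :
    (List.range cs.length).map (fun k => String.ofList (cs.drop k)) = pvTails cs := by
  induction cs with
  | nil => simp [pvTails]
  | cons c cs ih =>
    rw [List.length_cons, List.range_succ_eq_map, List.map_cons, List.map_map]
    simp only [pvTails, List.drop_zero]
    rw [← ih]
    congr 1

theorem pv_alt_eq_tails (parola : String) : es76_alt parola = pvTails parola.toList := by
  unfold es76_alt
  rw [PySem.Str.len_eq, PySem.List.pyRange_one]
  rw [show ((parola.toList.length : Int) - 0).toNat = parola.toList.length by omega]
  rw [List.map_map]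
  rw [← pv_alt_eq_tails_list parola.toList]
  apply List.map_congr_left
  intro k _
  simp [Function.comp, PySem.Str.slice, PySem.List.slice_from_natCast]

-- ===== VERDICT (by name: the statement is the Claim_ definition above) =====
theorem es76_spec : Claim_equal_es76 := by
  intro parola _
  unfold Spec_es76
  rw [pv_es76_eq_tails, pv_alt_eq_tails]
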